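-- pv_equiv track=rewrite | github.com/kimariyb/leetcode | algorithm/graphsearch/safe_path.py | minMaxDanger
-- ===== SOURCE A (Python) =====
-- import heapq
-- from typing import List
--
-- def minMaxDanger(n: int, edges: List[List[int]]) -> int:
--     # 初始化邻接表
--     adj = [[] for _ in range(n + 1)]
--     for x, y, w in edges:
--         adj[x].append((y, w))
--         adj[y].append((x, w))
--
--     # 初始化 max_w 和优先队列
--     max_w = [float('inf')] * (n + 1)
--     max_w[0] = 0
--     heap = []
--     heapq.heappush(heap, (0, 0)) # (当前危险系数, 当前节点)
--
--     # Dijkstra 算法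
--     while heap:
--         # 取出当前最大危险系数最小的节点
--         curr_max, curr_node = heapq.heappop(heap)
--         # 如果到达目标节点，返回当前路径的最大危险系数
--         if curr_node == n:
--             return curr_max
--
--         # 如果当前路径的最大危险系数大于已知的最小值，跳过
--         if curr_max > max_w[curr_node]:
--             continue
--
--         # 遍历当前节点的所有邻居
--         for v, w in adj[curr_node]:
--             # 计算经过当前边后的新路径最大危险系数
--             new_max = max(curr_max, w)
--             # 如果新路径的最大危险系数小于已知的最小值，更新并加入优先队列
--             if new_max < max_w[v]:
--                 max_w[v] = new_max
--                 heapq.heappush(heap, (new_max, v))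
--
--     # 如果没有找到路径，返回 -1
--     return -1
-- ===== SOURCE B (Python) =====
-- def _reachable(n, edges, t):
--     # monotone closure of {0} under edges of weight <= t
--     seen = {0}
--     for _ in range(n + 1):
--         grown = set(seen)
--         for x, y, w in edges:
--             if w <= t:
--                 if x in seen:
--                     grown.add(y)
--                 if y in seen:
--                     grown.add(x)
--         if grown == seen:
--             break
--         seen = grown
--     return n in seen
--
--
-- def minMaxDanger(n, edges):
--     # candidate answers: 0 (start value) and every positive edge weight, ascending
--     for t in sorted({0} | {w for _, _, w in edges if w > 0}):
--         if _reachable(n, edges, t):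
--             return t
--     return -1
-- ===== Notes on version B (the rewrite author's own statement) =====
-- stated objective: alternative
-- what changed: Replaces A's heap-based Dijkstra over minimax path dangers by a threshold scan: candidate answers (0 and every positive edge weight) are sorted ascending and the first t for which a monotone closure shows 0 and n connected using only edges of weight <= t is returned (-1 if none).
-- outside the precondition, e.g. on minMaxDanger(1, [[1, -2, 0]]): A returns 0, B returns -1
import Mathlib
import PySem

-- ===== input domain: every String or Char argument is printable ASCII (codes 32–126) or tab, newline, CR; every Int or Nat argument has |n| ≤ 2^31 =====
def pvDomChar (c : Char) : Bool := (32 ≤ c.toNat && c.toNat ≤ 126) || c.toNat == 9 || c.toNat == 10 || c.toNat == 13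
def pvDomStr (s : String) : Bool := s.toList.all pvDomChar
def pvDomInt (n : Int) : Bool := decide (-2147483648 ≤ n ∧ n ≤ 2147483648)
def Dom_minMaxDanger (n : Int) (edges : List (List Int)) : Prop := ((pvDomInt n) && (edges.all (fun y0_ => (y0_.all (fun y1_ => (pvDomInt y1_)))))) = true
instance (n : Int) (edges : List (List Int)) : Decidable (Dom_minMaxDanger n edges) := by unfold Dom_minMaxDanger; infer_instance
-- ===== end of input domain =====

-- B replaces A's heap-based Dijkstra by a threshold scan (smallest candidate weight whose
-- light-edge subgraph connects 0 to n, decided by a monotone closure); objective: alternative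
-- (a genuinely different algorithm, not claimed faster).

-- ===== PORT A =====
-- adj[x].append((y,w)); adj[y].append((x,w))  (malformed edges raise in Python: outside Pre_)
def pvEdgeAdd (adj : List (List (Int × Int))) (e : List Int) : List (List (Int × Int)) :=
  match e with
  | [x, y, w] => (adj.modify x.toNat (fun l => l ++ [(y, w)])).modify y.toNat (fun l => l ++ [(x, w)])
  | _ => adj

-- heapq pop: the lexicographically least (danger, node) pair in the heap
def pvMinLex (m : Int × Int) (l : List (Int × Int)) : Int × Int :=
  l.foldl (fun b x => if x.1 < b.1 ∨ (x.1 = b.1 ∧ x.2 < b.2) then x else b) m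

-- a < max_w[v] resp. a > max_w[v], where none plays float('inf')
def pvFinLt (a : Int) (o : Option Int) : Bool := match o with | none => true  | some m => a < m
def pvFinGt (a : Int) (o : Option Int) : Bool := match o with | none => false | some m => m < a

-- body of "for v, w in adj[curr_node]: …" with state (max_w, heap)
def pvRelax (d0 : Int) (s : List (Option Int) × List (Int × Int)) (p : Int × Int) :
    List (Option Int) × List (Int × Int) :=
  let new := max d0 p.2
  if pvFinLt new (s.1.getD p.1.toNat none) then
    (s.1.set p.1.toNat (some new), s.2 ++ [(new, p.1)])
  else s

-- the while-loop; fuel only makes it total (proved sufficient under Pre_)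
def pvLoopA (n : Int) (adj : List (List (Int × Int))) :
    Nat → List (Option Int) → List (Int × Int) → Int
  | _, _, [] => -1
  | 0, _, _ :: _ => -1
  | fuel + 1, maxw, h :: t =>
    let m := pvMinLex h t
    let rest := (h :: t).erase m
    if m.2 = n then m.1
    else if pvFinGt m.1 (maxw.getD m.2.toNat none) then pvLoopA n adj fuel maxw rest
    else
      let s := (adj.getD m.2.toNat []).foldl (pvRelax m.1) (maxw, rest)
      pvLoopA n adj fuel s.1 s.2

-- max(0, all weights): every danger value the loop manipulates stays in [0, M]
def pvMaxW (edges : List (List Int)) : Int :=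
  edges.foldl (fun acc e => match e with | [_, _, w] => max acc w | _ => acc) 0

def minMaxDanger (n : Int) (edges : List (List Int)) : Int :=
  let N := (n + 1).toNat
  let adj := edges.foldl pvEdgeAdd (List.replicate N ([] : List (Int × Int)))
  let maxw := (List.replicate N (none : Option Int)).set 0 (some 0)
  pvLoopA n adj (N * (pvMaxW edges + 1).toNat + 2) maxw [(0, 0)]

-- ===== PORT B =====
-- {w for _, _, w in edges if w > 0}
def pvPosW (edges : List (List Int)) : List Int :=
  edges.foldl (fun acc e => match e with
    | [_, _, w] => if 0 < w then acc ++ [w] else acc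
    | _ => acc) []

-- sorted({0} | {w … if w > 0})
def pvCands (edges : List (List Int)) : List Int :=
  PySem.List.sorted (PySem.Set.union (PySem.Set.ofList [0]) (PySem.Set.ofList (pvPosW edges)))
    (fun x => x) false

-- one edge of the inner "for x, y, w in edges" growing step
def pvGrow (seen : PySem.Set Int) (t : Int) (grown : PySem.Set Int) (e : List Int) : PySem.Set Int :=
  match e with
  | [x, y, w] =>
    if w ≤ t then
      let g1 := if PySem.Set.contains seen x then PySem.Set.add grown y else grown
      if PySem.Set.contains seen y then PySem.Set.add g1 x else g1
    else grown
  | _ => grown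

-- "for _ in range(n+1): … if grown == seen: break …; return n in seen"
def pvReachLoop (n : Int) (edges : List (List Int)) (t : Int) :
    Nat → PySem.Set Int → Bool
  | 0, seen => PySem.Set.contains seen n
  | k + 1, seen =>
    let grown := edges.foldl (pvGrow seen t) (PySem.Set.ofList seen)
    if PySem.Set.equal grown seen then PySem.Set.contains seen n
    else pvReachLoop n edges t k grown

def pvReachable (n : Int) (edges : List (List Int)) (t : Int) : Bool :=
  pvReachLoop n edges t (n + 1).toNat (PySem.Set.ofList [0])

-- "for t in cands: if _reachable(…): return t"
def pvScan (n : Int) (edges : List (List Int)) : List Int → Int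
  | [] => -1
  | t :: ts => if pvReachable n edges t then t else pvScan n edges ts

def minMaxDanger_alt (n : Int) (edges : List (List Int)) : Int :=
  pvScan n edges (pvCands edges)

-- ===== PRECONDITION & SPEC =====
def pvEdgeOK (n : Int) (e : List Int) : Bool :=
  match e with
  | [x, y, _] => decide (0 ≤ x) && decide (x ≤ n) && decide (0 ≤ y) && decide (y ≤ n)
  | _ => false

-- Pre_ excludes n < 0 and edges that are not [x, y, w] lists (A raises IndexError/ValueError
-- there), and edges whose endpoints lie outside 0..n: those either raise IndexError in A or,
-- when negative, are silently aliased to other rows by Python's negative-index wraparound —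
-- outside the problem's domain of nodes 0..n.
def Pre_minMaxDanger (n : Int) (edges : List (List Int)) : Prop :=
  0 ≤ n ∧ edges.all (pvEdgeOK n) = true

instance (n : Int) (edges : List (List Int)) : Decidable (Pre_minMaxDanger n edges) := by
  unfold Pre_minMaxDanger; infer_instance

def pvWitness_minMaxDanger : Int × List (List Int) := (2, [[0, 1, 5], [1, 2, 3]])

def Spec_minMaxDanger (n : Int) (edges : List (List Int)) (out : Int) : Prop := out = minMaxDanger_alt n edges
instance (n : Int) (edges : List (List Int)) (out : Int) : Decidable (Spec_minMaxDanger n edges out) := by unfold Spec_minMaxDanger; infer_instance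

-- ===== CLAIM (what is proved, stated in full; the proofs are below) =====
def Claim_equal_minMaxDanger : Prop := ∀ (n : Int) (edges : List (List Int)), Dom_minMaxDanger n edges → Pre_minMaxDanger n edges → Spec_minMaxDanger n edges (minMaxDanger n edges)

-- ===== LEMMAS AND PROOFS =====

-- ---------- graph-theoretic vocabulary ----------

-- an edge of weight ≤ t between a and b (either orientation)
def pvEdgeLe (edges : List (List Int)) (t a b : Int) : Prop :=
  ∃ x y w, [x, y, w] ∈ edges ∧ w ≤ t ∧ ((x = a ∧ y = b) ∨ (x = b ∧ y = a))

-- nodes connected to 0 through edges of weight ≤ t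
inductive pvReach (edges : List (List Int)) (t : Int) : Int → Prop
  | refl : pvReach edges t 0
  | step {a b : Int} : pvReach edges t a → pvEdgeLe edges t a b → pvReach edges t b

-- nodes connected to the seed set s through edges of weight ≤ t
inductive pvReachF (edges : List (List Int)) (t : Int) (s : List Int) : Int → Prop
  | base {z : Int} : z ∈ s → pvReachF edges t s z
  | step {a b : Int} : pvReachF edges t s a → pvEdgeLe edges t a b → pvReachF edges t s b

theorem pvEdgeLe_mono {edges : List (List Int)} {t t' a b : Int} (h : t ≤ t')
    (he : pvEdgeLe edges t a b) : pvEdgeLe edges t' a b := by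
  obtain ⟨x, y, w, hm, hw, ho⟩ := he
  exact ⟨x, y, w, hm, le_trans hw h, ho⟩

theorem pvReach_mono {edges : List (List Int)} {t t' z : Int} (h : t ≤ t')
    (hr : pvReach edges t z) : pvReach edges t' z := by
  induction hr with
  | refl => exact .refl
  | step _ he ih => exact .step ih (pvEdgeLe_mono h he)

theorem pvReachF_mono_s {edges : List (List Int)} {t : Int} {s s' : List Int}
    (hs : ∀ z, z ∈ s → z ∈ s') {z : Int} (hr : pvReachF edges t s z) : pvReachF edges t s' z := by
  induction hr with
  | base hz => exact .base (hs _ hz)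
  | step _ he ih => exact .step ih he

theorem pvReachF_absorb {edges : List (List Int)} {t : Int} {s s' : List Int}
    (hs : ∀ z, z ∈ s' → pvReachF edges t s z) {z : Int}
    (hr : pvReachF edges t s' z) : pvReachF edges t s z := by
  induction hr with
  | base hz => exact hs _ hz
  | step _ he ih => exact .step ih he

theorem pvReachF_fix {edges : List (List Int)} {t : Int} {seen : List Int}
    (hstep : ∀ a b : Int, pvEdgeLe edges t a b → a ∈ seen → b ∈ seen) {z : Int}
    (h : pvReachF edges t seen z) : z ∈ seen := by
  induction h with
  | base hz => exact hz
  | step _ he ih => exact hstep _ _ he ih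

theorem pvReachF_singleton_iff {edges : List (List Int)} {t z : Int} :
    pvReachF edges t [0] z ↔ pvReach edges t z := by
  constructor
  · intro h
    induction h with
    | base hz => simp at hz; subst hz; exact .refl
    | step _ he ih => exact .step ih he
  · intro h
    induction h with
    | refl => exact .base (by simp)
    | step _ he ih => exact .step ih he

-- edgeOK unpacked
theorem pvCard_le {n : Int} (hn : 0 ≤ n) {l : List Int} (hnd : l.Nodup)
    (hb : ∀ z ∈ l, 0 ≤ z ∧ z ≤ n) : (l.length : Int) ≤ n + 1 := by
  have hsub : l.toFinset ⊆ Finset.Icc 0 n := by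
    intro z hz
    rw [List.mem_toFinset] at hz
    simpa [Finset.mem_Icc] using hb z hz
  have h1 : l.toFinset.card = l.length := List.toFinset_card_of_nodup hnd
  have h2 := Finset.card_le_card hsub
  rw [h1, Int.card_Icc] at h2
  omega

-- ---------- B side: the closure decides pvReach ----------

theorem pvGrow_mem {seen : List Int} {t : Int} {acc : List Int} {e : List Int} {z : Int} :
    z ∈ pvGrow seen t acc e ↔
      z ∈ acc ∨ ∃ x y w, e = [x, y, w] ∧ w ≤ t ∧
        ((x ∈ seen ∧ z = y) ∨ (y ∈ seen ∧ z = x)) := by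
  rcases e with _ | ⟨x, _ | ⟨y, _ | ⟨w, _ | ⟨a, e'⟩⟩⟩⟩ <;> simp [pvGrow]
  split_ifs with hw hx hy hx2 <;>
    simp_all [PySem.Set.mem_add, PySem.Set.contains_iff] <;> tauto

theorem pvGrow_nodup {seen : List Int} {t : Int} {acc : List Int} {e : List Int}
    (h : acc.Nodup) : (pvGrow seen t acc e).Nodup := by
  rcases e with _ | ⟨x, _ | ⟨y, _ | ⟨w, _ | ⟨a, e'⟩⟩⟩⟩ <;> simp [pvGrow] <;> try exact h
  split_ifs <;> first
    | exact h
    | exact PySem.Set.nodup_add _ _ h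
    | exact PySem.Set.nodup_add _ _ (PySem.Set.nodup_add _ _ h)

theorem pvGrowFold_mem {seen : List Int} {t : Int} {z : Int} :
    ∀ (l : List (List Int)) (acc : List Int),
    (z ∈ l.foldl (pvGrow seen t) acc ↔
      z ∈ acc ∨ ∃ x y w, [x, y, w] ∈ l ∧ w ≤ t ∧
        ((x ∈ seen ∧ z = y) ∨ (y ∈ seen ∧ z = x))) := by
  intro l
  induction l with
  | nil => simp
  | cons e l ih =>
    intro acc
    rw [List.foldl_cons, ih]
    rw [pvGrow_mem]
    constructor
    · rintro (( h | ⟨x, y, w, he, hw, ho⟩) | ⟨x, y, w, hm, hw, ho⟩)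
      · exact Or.inl h
      · exact Or.inr ⟨x, y, w, by simp [he], hw, ho⟩
      · exact Or.inr ⟨x, y, w, by simp [hm], hw, ho⟩
    · rintro (h | ⟨x, y, w, hm, hw, ho⟩)
      · exact Or.inl (Or.inl h)
      · rcases List.mem_cons.mp hm with he | hm'
        · exact Or.inl (Or.inr ⟨x, y, w, he.symm, hw, ho⟩)
        · exact Or.inr ⟨x, y, w, hm', hw, ho⟩

theorem pvGrowFold_nodup {seen : List Int} {t : Int} :
    ∀ (l : List (List Int)) (acc : List Int), acc.Nodup → (l.foldl (pvGrow seen t) acc).Nodup := by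
  intro l
  induction l with
  | nil => intro acc h; simpa
  | cons e l ih => intro acc h; exact ih _ (pvGrow_nodup h)

theorem pvReachLoop_iff {n t : Int} {edges : List (List Int)} (hn : 0 ≤ n)
    (hok : ∀ e ∈ edges, pvEdgeOK n e = true) :
    ∀ (k : Nat) (seen : List Int), seen.Nodup → (∀ z ∈ seen, 0 ≤ z ∧ z ≤ n) → 0 ∈ seen →
    (n + 2 : Int) ≤ k + seen.length →
    (pvReachLoop n edges t k seen = true ↔ pvReachF edges t seen n) := by
  intro k
  induction k with
  | zero =>
    intro seen hnd hb _ hfuel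
    have := pvCard_le hn hnd hb
    simp at hfuel
    omega
  | succ k ih =>
    intro seen hnd hb h0 hfuel
    have hofl : PySem.Set.ofList seen = seen := PySem.Set.ofList_eq_self_of_nodup _ hnd
    rw [pvReachLoop, hofl]
    set grown := edges.foldl (pvGrow seen t) seen with hgrown
    have hsub : ∀ z, z ∈ seen → z ∈ grown := by
      intro z hz; rw [hgrown, pvGrowFold_mem]; exact Or.inl hz
    have hgmem : ∀ z, z ∈ grown ↔ z ∈ seen ∨ ∃ x y w, [x, y, w] ∈ edges ∧ w ≤ t ∧
        ((x ∈ seen ∧ z = y) ∨ (y ∈ seen ∧ z = x)) := by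
      intro z; rw [hgrown]; exact pvGrowFold_mem _ _
    have hsound : ∀ z, z ∈ grown → pvReachF edges t seen z := by
      intro z hz
      rcases (hgmem z).mp hz with h | ⟨x, y, w, hm, hw, ho⟩
      · exact .base h
      · rcases ho with ⟨hx, hzy⟩ | ⟨hy, hzx⟩
        · rw [hzy]; exact .step (.base hx) ⟨x, y, w, hm, hw, Or.inl ⟨rfl, rfl⟩⟩
        · rw [hzx]; exact .step (.base hy) ⟨x, y, w, hm, hw, Or.inr ⟨rfl, rfl⟩⟩
    split_ifs with heq
    · -- fixpoint: break
      have hfix : ∀ z, z ∈ grown ↔ z ∈ seen := fun z => (PySem.Set.equal_iff _ _).mp heq z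
      rw [PySem.Set.contains_iff]
      constructor
      · exact fun h => .base h
      · intro h
        refine pvReachF_fix ?_ h
        intro a b he ha
        obtain ⟨x, y, w, hm, hw, ho⟩ := he
        apply (hfix b).mp
        rw [hgmem]
        rcases ho with ⟨hx, hy⟩ | ⟨hx, hy⟩
        · exact Or.inr ⟨x, y, w, hm, hw, Or.inl ⟨hx ▸ ha, hy.symm⟩⟩
        · exact Or.inr ⟨x, y, w, hm, hw, Or.inr ⟨hy ▸ ha, hx.symm⟩⟩
    · -- strict growth
      have hgnd : grown.Nodup := pvGrowFold_nodup _ _ hnd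
      have hgb : ∀ z ∈ grown, 0 ≤ z ∧ z ≤ n := by
        intro z hz
        rcases (hgmem z).mp hz with h | ⟨x, y, w, hm, hw, ho⟩
        · exact hb z h
        · have hB := hok _ hm
          simp [pvEdgeOK] at hB
          rcases ho with ⟨_, rfl⟩ | ⟨_, rfl⟩ <;> constructor <;> tauto
      have hne : ∃ z, z ∈ grown ∧ z ∉ seen := by
        by_contra hc
        push_neg at hc
        apply heq
        rw [PySem.Set.equal_iff]
        intro z; exact ⟨hc z, hsub z⟩
      have hlt : seen.length < grown.length := by
        obtain ⟨z, hz1, hz2⟩ := hne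
        have h1 : seen.toFinset ⊂ grown.toFinset := by
          constructor
          · intro a ha; rw [List.mem_toFinset] at *; exact hsub a ha
          · intro hcon
            exact hz2 (List.mem_toFinset.mp (hcon (List.mem_toFinset.mpr hz1)))
        have := Finset.card_lt_card h1
        rwa [List.toFinset_card_of_nodup hnd, List.toFinset_card_of_nodup hgnd] at this
      have := ih grown hgnd hgb (hsub 0 h0) (by push_cast at hfuel ⊢; omega)
      rw [this]
      constructor
      · exact fun h => pvReachF_absorb hsound h
      · exact fun h => pvReachF_mono_s hsub h

theorem pvReachable_iff {n t : Int} {edges : List (List Int)} (hn : 0 ≤ n)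
    (hok : ∀ e ∈ edges, pvEdgeOK n e = true) :
    (pvReachable n edges t = true ↔ pvReach edges t n) := by
  rw [pvReachable]
  have h0 : PySem.Set.ofList [(0 : Int)] = [0] := by decide
  rw [h0]
  rw [pvReachLoop_iff hn hok (n + 1).toNat [0] (by simp) (by simp [hn]) (by simp) (by simp; omega)]
  exact pvReachF_singleton_iff


-- ---------- candidate list and scan ----------

theorem pvPosW_fold_mem {v : Int} :
    ∀ (l : List (List Int)) (acc : List Int),
    (v ∈ l.foldl (fun acc e => match e with
        | [_, _, w] => if 0 < w then acc ++ [w] else acc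
        | _ => acc) acc ↔ v ∈ acc ∨ ((∃ x y, [x, y, v] ∈ l) ∧ 0 < v)) := by
  intro l
  induction l with
  | nil => simp
  | cons e l ih =>
    intro acc
    rw [List.foldl_cons]
    rcases e with _ | ⟨x, _ | ⟨y, _ | ⟨w, _ | ⟨a, e'⟩⟩⟩⟩
    · rw [ih]; simp
    · rw [ih]; simp
    · rw [ih]; simp
    · rw [ih]
      constructor
      · rintro (hin | ⟨⟨x', y', h⟩, hv⟩)
        · replace hin : v ∈ (if 0 < w then acc ++ [w] else acc) := hin
          split_ifs at hin with hw
          · rcases List.mem_append.mp hin with h | h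
            · exact Or.inl h
            · simp at h
              rw [h]
              exact Or.inr ⟨⟨x, y, List.mem_cons_self ..⟩, hw⟩
          · exact Or.inl hin
        · exact Or.inr ⟨⟨x', y', List.mem_cons_of_mem _ h⟩, hv⟩
      · rintro (hin | ⟨⟨x', y', h⟩, hv⟩) <;>
          refine (show (v ∈ (if 0 < w then acc ++ [w] else acc) ∨ ((∃ x y, [x, y, v] ∈ l) ∧ 0 < v)) →
            _ ∨ ((∃ x y, [x, y, v] ∈ l) ∧ 0 < v) from fun h => h) ?_
        · split_ifs with hw
          · exact Or.inl (List.mem_append.mpr (Or.inl hin))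
          · exact Or.inl hin
        · rcases List.mem_cons.mp h with he | h2
          · have hvw : v = w := by
              injection he with _ t; injection t with _ t2; injection t2 with t3 _
            rw [hvw]
            split_ifs with hw
            · exact Or.inl (List.mem_append.mpr (Or.inr (by simp)))
            · omega
          · exact Or.inr ⟨⟨x', y', h2⟩, hv⟩
    · rw [ih]; simp

theorem pvPosW_mem {edges : List (List Int)} {v : Int} :
    v ∈ pvPosW edges ↔ (∃ x y, [x, y, v] ∈ edges) ∧ 0 < v := by
  rw [pvPosW, pvPosW_fold_mem]; simp

theorem pvMaxW_fold_le :
    ∀ (l : List (List Int)) (acc : Int),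
    acc ≤ l.foldl (fun acc e => match e with | [_, _, w] => max acc w | _ => acc) acc := by
  intro l
  induction l with
  | nil => simp
  | cons e l ih =>
    intro acc
    rw [List.foldl_cons]
    refine le_trans ?_ (ih _)
    rcases e with _ | ⟨x, _ | ⟨y, _ | ⟨w, _ | ⟨a, e'⟩⟩⟩⟩ <;> simp

theorem pvMaxW_nonneg {edges : List (List Int)} : 0 ≤ pvMaxW edges := pvMaxW_fold_le edges 0

theorem pvMaxW_fold_mem {x y w : Int} :
    ∀ (l : List (List Int)) (acc : Int), [x, y, w] ∈ l →
    w ≤ l.foldl (fun acc e => match e with | [_, _, w] => max acc w | _ => acc) acc := by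
  intro l
  induction l with
  | nil => simp
  | cons e l ih =>
    intro acc hm
    rw [List.foldl_cons]
    rcases List.mem_cons.mp hm with he | hm'
    · subst he
      exact le_trans (le_max_right _ _) (pvMaxW_fold_le _ _)
    · exact ih _ hm'

theorem pvMaxW_ge {edges : List (List Int)} {x y w : Int} (h : [x, y, w] ∈ edges) :
    w ≤ pvMaxW edges := pvMaxW_fold_mem edges 0 h

theorem pvCands_mem {edges : List (List Int)} {v : Int} :
    v ∈ pvCands edges ↔ v = 0 ∨ ((∃ x y, [x, y, v] ∈ edges) ∧ 0 < v) := by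
  rw [pvCands]
  rw [PySem.List.mem_sorted]
  rw [PySem.Set.mem_union]
  rw [PySem.Set.mem_ofList, PySem.Set.mem_ofList]
  rw [pvPosW_mem]
  simp

theorem pvCands_sorted {edges : List (List Int)} : (pvCands edges).Pairwise (· ≤ ·) := by
  have := PySem.List.sorted_pairwise
    (xs := PySem.Set.union (PySem.Set.ofList [(0 : Int)]) (PySem.Set.ofList (pvPosW edges)))
    (key := fun x : Int => x)
  exact this

theorem pvScan_neg {n : Int} {edges : List (List Int)} :
    ∀ l : List Int, (∀ t ∈ l, pvReachable n edges t = false) → pvScan n edges l = -1 := by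
  intro l
  induction l with
  | nil => intro _; rfl
  | cons h tl ih =>
    intro hall
    rw [pvScan]
    rw [hall h (by simp)]
    simp
    exact ih (fun t ht => hall t (by simp [ht]))

theorem pvScan_hit {n : Int} {edges : List (List Int)} {r : Int} :
    ∀ l : List Int, l.Pairwise (· ≤ ·) → r ∈ l → pvReachable n edges r = true →
    (∀ t ∈ l, t < r → pvReachable n edges t = false) → pvScan n edges l = r := by
  intro l
  induction l with
  | nil => simp
  | cons h tl ih =>
    intro hpw hmem hr hsmall
    rw [pvScan]
    by_cases hh : pvReachable n edges h = true
    · have hhr : h = r := by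
        rcases List.mem_cons.mp hmem with rfl | hmem'
        · rfl
        · have hle : h ≤ r := (List.pairwise_cons.mp hpw).1 r hmem'
          rcases lt_or_eq_of_le hle with hlt | heq2
          · rw [hsmall h (by simp) hlt] at hh; cases hh
          · exact heq2
      subst hhr
      simp [hh]
    · have hne : h ≠ r := fun he => hh (he ▸ hr)
      have hfalse : pvReachable n edges h = false := by
        cases hcase : pvReachable n edges h
        · rfl
        · exact absurd hcase hh
      rw [hfalse]
      simp
      exact ih (List.pairwise_cons.mp hpw).2
        (by rcases List.mem_cons.mp hmem with rfl | h2
            · exact absurd rfl hne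
            · exact h2) hr
        (fun t ht hlt => hsmall t (by simp [ht]) hlt)

-- ---------- A side: state vocabulary ----------

-- max_w[z] (none = float('inf'))
def pvMw (maxw : List (Option Int)) (z : Int) : Option Int := maxw.getD z.toNat none

-- "max_w[·] is finite and ≤ t"
def pvOle (o : Option Int) (t : Int) : Prop := ∃ m, o = some m ∧ m ≤ t

-- o is ≤ o' in the order with none = ∞ (and finite stays finite)
def pvBelow (o o' : Option Int) : Prop := ∀ m, o' = some m → ∃ k, o = some k ∧ k ≤ m

-- every edge at v is relaxed w.r.t. value m at v
def pvRelaxedAt (edges : List (List Int)) (maxw : List (Option Int)) (v m : Int) : Prop :=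
  ∀ x y w : Int, [x, y, w] ∈ edges →
    (x = v → pvOle (pvMw maxw y) (max m w)) ∧ (y = v → pvOle (pvMw maxw x) (max m w))

-- the Dijkstra loop invariant
def pvInv (n : Int) (edges : List (List Int)) (maxw : List (Option Int))
    (heap : List (Int × Int)) : Prop :=
  maxw.length = (n + 1).toNat ∧
  pvMw maxw 0 = some 0 ∧
  (∀ v : Int, 0 ≤ v → v ≤ n → ∀ m, pvMw maxw v = some m →
      ((m, v) ∈ heap ∨ pvRelaxedAt edges maxw v m)) ∧
  (∀ m, pvMw maxw n = some m → (m, n) ∈ heap) ∧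
  (∀ d v : Int, (d, v) ∈ heap → pvReach edges d v ∧ 0 ≤ v ∧ v ≤ n ∧ 0 ≤ d ∧
      d ≤ pvMaxW edges ∧ (d = 0 ∨ ∃ x y, [x, y, d] ∈ edges)) ∧
  (∀ d v : Int, (d, v) ∈ heap → pvOle (pvMw maxw v) d)

-- termination potential
def pvRank (M : Int) : Option Int → Nat
  | none => (M + 1).toNat
  | some x => x.toNat

def pvPhi (M : Int) (maxw : List (Option Int)) (heap : List (Int × Int)) : Nat :=
  (maxw.map (pvRank M)).sum + heap.length

theorem pvBelow_refl (o : Option Int) : pvBelow o o := fun m h => ⟨m, h, le_refl m⟩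

theorem pvBelow_trans {a b c : Option Int} (h1 : pvBelow a b) (h2 : pvBelow b c) : pvBelow a c := by
  intro m hc
  obtain ⟨k, hb, hk⟩ := h2 m hc
  obtain ⟨j, ha, hj⟩ := h1 k hb
  exact ⟨j, ha, le_trans hj hk⟩

theorem pvOle_of_below {o o' : Option Int} {t : Int} (hb : pvBelow o o') (h : pvOle o' t) :
    pvOle o t := by
  obtain ⟨m, hm, hmt⟩ := h
  obtain ⟨k, hk, hkm⟩ := hb m hm
  exact ⟨k, hk, le_trans hkm hmt⟩

theorem pvOle_mono {o : Option Int} {t t' : Int} (h : t ≤ t') (ho : pvOle o t) : pvOle o t' := by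
  obtain ⟨m, hm, hmt⟩ := ho
  exact ⟨m, hm, le_trans hmt h⟩

theorem pvRelaxedAt_below {edges : List (List Int)} {maxw maxw' : List (Option Int)} {v m : Int}
    (hb : ∀ z : Int, pvBelow (pvMw maxw' z) (pvMw maxw z))
    (h : pvRelaxedAt edges maxw v m) : pvRelaxedAt edges maxw' v m := by
  intro x y w hm
  obtain ⟨h1, h2⟩ := h x y w hm
  exact ⟨fun hx => pvOle_of_below (hb y) (h1 hx), fun hy => pvOle_of_below (hb x) (h2 hy)⟩

-- ---------- set/getD bookkeeping ----------

theorem pvMw_set_self {maxw : List (Option Int)} {z : Int} (hz : 0 ≤ z)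
    (hlen : z.toNat < maxw.length) (o : Option Int) :
    pvMw (maxw.set z.toNat o) z = o := by
  simp [pvMw, List.getD_eq_getElem?_getD, List.getElem?_set, hlen]

theorem pvMw_set_ne {maxw : List (Option Int)} {z z' : Int} (hz : 0 ≤ z) (hz' : 0 ≤ z')
    (hne : z' ≠ z) (o : Option Int) :
    pvMw (maxw.set z.toNat o) z' = pvMw maxw z' := by
  have : z.toNat ≠ z'.toNat := by omega
  simp [pvMw, List.getD_eq_getElem?_getD, List.getElem?_set, this]

theorem pvSum_set (f : Option Int → Nat) :
    ∀ (l : List (Option Int)) (i : Nat), i < l.length → ∀ a : Option Int,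
    ((l.set i a).map f).sum + f (l.getD i none) = (l.map f).sum + f a := by
  intro l
  induction l with
  | nil => intro i h; simp at h
  | cons x l ih =>
    intro i h a
    cases i with
    | zero => simp [List.set]; omega
    | succ j =>
      simp only [List.set, List.map_cons, List.sum_cons, List.getD_cons_succ]
      have := ih j (by simpa using h) a
      omega

theorem pvSum_set_lt (f : Option Int → Nat) {l : List (Option Int)} {i : Nat}
    (h : i < l.length) {a : Option Int} (hdrop : f a < f (l.getD i none)) :
    ((l.set i a).map f).sum < (l.map f).sum := by
  have := pvSum_set f l i h a
  omega

theorem pvFinLt_eq_true_iff (a : Int) (o : Option Int) :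
    pvFinLt a o = true ↔ (∀ m, o = some m → a < m) := by
  cases o <;> simp [pvFinLt]

-- ---------- pop = lexicographic minimum ----------

theorem pvMinLex_foldl_mem :
    ∀ (l : List (Int × Int)) (b : Int × Int),
    l.foldl (fun b x => if x.1 < b.1 ∨ (x.1 = b.1 ∧ x.2 < b.2) then x else b) b = b ∨
    l.foldl (fun b x => if x.1 < b.1 ∨ (x.1 = b.1 ∧ x.2 < b.2) then x else b) b ∈ l := by
  intro l
  induction l with
  | nil => intro b; simp
  | cons x l ih =>
    intro b
    rw [List.foldl_cons]
    rcases ih (if x.1 < b.1 ∨ (x.1 = b.1 ∧ x.2 < b.2) then x else b) with h | h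
    · rw [h]
      split_ifs
      · exact Or.inr (by simp)
      · exact Or.inl rfl
    · exact Or.inr (by simp [h])

theorem pvMinLex_mem {h : Int × Int} {t : List (Int × Int)} : pvMinLex h t ∈ h :: t := by
  rcases pvMinLex_foldl_mem t h with he | he
  · rw [pvMinLex, he]; simp
  · rw [pvMinLex]; exact List.mem_cons_of_mem _ he

theorem pvMinLex_foldl_min :
    ∀ (l : List (Int × Int)) (b : Int × Int),
    (l.foldl (fun b x => if x.1 < b.1 ∨ (x.1 = b.1 ∧ x.2 < b.2) then x else b) b).1 ≤ b.1 ∧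
    ∀ x ∈ l, (l.foldl (fun b x => if x.1 < b.1 ∨ (x.1 = b.1 ∧ x.2 < b.2) then x else b) b).1 ≤ x.1 := by
  intro l
  induction l with
  | nil => intro b; simp
  | cons x l ih =>
    intro b
    rw [List.foldl_cons]
    obtain ⟨h1, h2⟩ := ih (if x.1 < b.1 ∨ (x.1 = b.1 ∧ x.2 < b.2) then x else b)
    constructor
    · refine le_trans h1 ?_
      split_ifs with hc
      · rcases hc with hc | ⟨hc, _⟩
        · exact le_of_lt hc
        · exact le_of_eq hc
      · exact le_refl _
    · intro y hy
      rcases List.mem_cons.mp hy with rfl | hy'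
      · refine le_trans h1 ?_
        split_ifs with hc
        · exact le_refl _
        · push_neg at hc
          exact hc.1
      · exact h2 y hy'

theorem pvMinLex_min {h : Int × Int} {t : List (Int × Int)} :
    ∀ x ∈ h :: t, (pvMinLex h t).1 ≤ x.1 := by
  intro x hx
  obtain ⟨h1, h2⟩ := pvMinLex_foldl_min t h
  rcases List.mem_cons.mp hx with rfl | hx'
  · exact h1
  · exact h2 x hx'

-- ---------- adjacency characterization ----------

theorem pvRowMod_mem {A : List (List (Int × Int))} {j i : Nat} {q p : Int × Int}
    (h : p ∈ (A.modify j (fun r => r ++ [q])).getD i []) :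
    p ∈ A.getD i [] ∨ (j = i ∧ p = q) := by
  simp only [List.getD_eq_getElem?_getD, List.getElem?_modify] at h ⊢
  rcases hrow : A[i]? with _ | row
  · rw [hrow] at h; simp at h
  · rw [hrow] at h
    by_cases hji : j = i
    · subst hji
      simp at h ⊢
      tauto
    · simp [hji] at h ⊢
      tauto

theorem pvRowMod_mem_of {A : List (List (Int × Int))} {j i : Nat} {q p : Int × Int}
    (h : p ∈ A.getD i []) :
    p ∈ (A.modify j (fun r => r ++ [q])).getD i [] := by
  simp only [List.getD_eq_getElem?_getD, List.getElem?_modify] at h ⊢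
  rcases hrow : A[i]? with _ | row
  · rw [hrow] at h; simp at h
  · rw [hrow] at h
    simp at h
    by_cases hji : j = i <;> simp [hji] <;> tauto

theorem pvRowMod_self {A : List (List (Int × Int))} {j : Nat} {q : Int × Int}
    (hj : j < A.length) :
    q ∈ (A.modify j (fun r => r ++ [q])).getD j [] := by
  simp only [List.getD_eq_getElem?_getD, List.getElem?_modify]
  rw [List.getElem?_eq_getElem hj]
  simp

theorem pvEdgeAdd_len (A : List (List (Int × Int))) (e : List Int) :
    (pvEdgeAdd A e).length = A.length := by
  rcases e with _ | ⟨x, _ | ⟨y, _ | ⟨w, _ | ⟨a, e'⟩⟩⟩⟩ <;> simp [pvEdgeAdd, List.length_modify]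

theorem pvAdj_pers : ∀ (l : List (List Int)) (A : List (List (Int × Int))) (i : Nat)
    (p : Int × Int), p ∈ A.getD i [] → p ∈ (l.foldl pvEdgeAdd A).getD i [] := by
  intro l
  induction l with
  | nil => intro A i p h; exact h
  | cons e l ih =>
    intro A i p h
    rw [List.foldl_cons]
    refine ih _ _ _ ?_
    rcases e with _ | ⟨x, _ | ⟨y, _ | ⟨w, _ | ⟨a, e'⟩⟩⟩⟩ <;>
      first
        | exact h
        | exact pvRowMod_mem_of (pvRowMod_mem_of h)

theorem pvAdj_sound : ∀ (l : List (List Int)) (A : List (List (Int × Int))) (i : Nat)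
    (p : Int × Int), p ∈ (l.foldl pvEdgeAdd A).getD i [] →
    p ∈ A.getD i [] ∨ ∃ x y w : Int, [x, y, w] ∈ l ∧ w = p.2 ∧
      ((x.toNat = i ∧ y = p.1) ∨ (y.toNat = i ∧ x = p.1)) := by
  intro l
  induction l with
  | nil => intro A i p h; exact Or.inl h
  | cons e l ih =>
    intro A i p h
    rw [List.foldl_cons] at h
    rcases e with _ | ⟨x, _ | ⟨y, _ | ⟨w, _ | ⟨a, e'⟩⟩⟩⟩
    case nil | cons.nil | cons.cons.nil | cons.cons.cons.cons =>
      rcases ih _ _ _ h with h' | ⟨x', y', w', hm, hw, ho⟩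
      · exact Or.inl h'
      · exact Or.inr ⟨x', y', w', List.mem_cons_of_mem _ hm, hw, ho⟩
    case cons.cons.cons.nil =>
      rcases ih _ _ _ h with h' | ⟨x', y', w', hm, hw, ho⟩
      · rcases pvRowMod_mem h' with h'' | ⟨hji, hp⟩
        · rcases pvRowMod_mem h'' with h3 | ⟨hji, hp⟩
          · exact Or.inl h3
          · exact Or.inr ⟨x, y, w, List.mem_cons_self .., by rw [hp], Or.inl ⟨hji, by rw [hp]⟩⟩
        · exact Or.inr ⟨x, y, w, List.mem_cons_self .., by rw [hp], Or.inr ⟨hji, by rw [hp]⟩⟩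
      · exact Or.inr ⟨x', y', w', List.mem_cons_of_mem _ hm, hw, ho⟩

theorem pvAdj_complete : ∀ (l : List (List Int)) (A : List (List (Int × Int)))
    (x y w : Int), [x, y, w] ∈ l → x.toNat < A.length → y.toNat < A.length →
    (y, w) ∈ (l.foldl pvEdgeAdd A).getD x.toNat [] ∧
    (x, w) ∈ (l.foldl pvEdgeAdd A).getD y.toNat [] := by
  intro l
  induction l with
  | nil => intro A x y w h; simp at h
  | cons e l ih =>
    intro A x y w hm hx hy
    rw [List.foldl_cons]
    rcases List.mem_cons.mp hm with he | hm'
    · subst he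
      have h1 : (y, w) ∈ (pvEdgeAdd A [x, y, w]).getD x.toNat [] := by
        show (y, w) ∈ ((A.modify x.toNat (fun r => r ++ [(y, w)])).modify y.toNat
          (fun r => r ++ [(x, w)])).getD x.toNat []
        exact pvRowMod_mem_of (pvRowMod_self hx)
      have h2 : (x, w) ∈ (pvEdgeAdd A [x, y, w]).getD y.toNat [] := by
        show (x, w) ∈ ((A.modify x.toNat (fun r => r ++ [(y, w)])).modify y.toNat
          (fun r => r ++ [(x, w)])).getD y.toNat []
        exact pvRowMod_self (by rw [List.length_modify]; exact hy)
      exact ⟨pvAdj_pers _ _ _ _ h1, pvAdj_pers _ _ _ _ h2⟩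
    · exact ih _ _ _ _ hm' (by rw [pvEdgeAdd_len]; exact hx) (by rw [pvEdgeAdd_len]; exact hy)

-- ---------- the inner relaxation loop ----------

theorem pvRelaxFold {n : Int} {edges : List (List Int)} (hn : 0 ≤ n)
    (hok : ∀ e ∈ edges, pvEdgeOK n e = true)
    {v0 d0 : Int} (hv00 : 0 ≤ v0) (hv0n : v0 ≤ n) (hd00 : 0 ≤ d0) (hd0M : d0 ≤ pvMaxW edges)
    (hd0set : d0 = 0 ∨ ∃ x y, [x, y, d0] ∈ edges) (hreach : pvReach edges d0 v0) :
    ∀ (l : List (Int × Int)),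
    (∀ p ∈ l, ∃ x y, [x, y, p.2] ∈ edges ∧ ((x = v0 ∧ y = p.1) ∨ (y = v0 ∧ x = p.1))) →
    ∀ (maxw : List (Option Int)) (hp : List (Int × Int)),
    maxw.length = (n + 1).toNat →
    pvMw maxw 0 = some 0 →
    pvMw maxw v0 = some d0 →
    (∀ d v : Int, (d, v) ∈ hp → pvReach edges d v ∧ 0 ≤ v ∧ v ≤ n ∧ 0 ≤ d ∧
        d ≤ pvMaxW edges ∧ (d = 0 ∨ ∃ x y, [x, y, d] ∈ edges)) →
    (∀ d v : Int, (d, v) ∈ hp → pvOle (pvMw maxw v) d) →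
    ((l.foldl (pvRelax d0) (maxw, hp)).1.length = (n + 1).toNat ∧
     pvMw (l.foldl (pvRelax d0) (maxw, hp)).1 0 = some 0 ∧
     pvMw (l.foldl (pvRelax d0) (maxw, hp)).1 v0 = some d0 ∧
     (∀ z : Int, pvBelow (pvMw (l.foldl (pvRelax d0) (maxw, hp)).1 z) (pvMw maxw z)) ∧
     (∀ z : Int, ∀ m' : Int, pvMw (l.foldl (pvRelax d0) (maxw, hp)).1 z = some m' →
        pvMw maxw z = some m' ∨ (m', z) ∈ (l.foldl (pvRelax d0) (maxw, hp)).2) ∧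
     (∀ p ∈ hp, p ∈ (l.foldl (pvRelax d0) (maxw, hp)).2) ∧
     (∀ d v : Int, (d, v) ∈ (l.foldl (pvRelax d0) (maxw, hp)).2 →
        pvReach edges d v ∧ 0 ≤ v ∧ v ≤ n ∧ 0 ≤ d ∧
        d ≤ pvMaxW edges ∧ (d = 0 ∨ ∃ x y, [x, y, d] ∈ edges)) ∧
     (∀ d v : Int, (d, v) ∈ (l.foldl (pvRelax d0) (maxw, hp)).2 →
        pvOle (pvMw (l.foldl (pvRelax d0) (maxw, hp)).1 v) d) ∧
     (∀ p ∈ l, pvOle (pvMw (l.foldl (pvRelax d0) (maxw, hp)).1 p.1) (max d0 p.2)) ∧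
     pvPhi (pvMaxW edges) (l.foldl (pvRelax d0) (maxw, hp)).1 (l.foldl (pvRelax d0) (maxw, hp)).2 ≤
       pvPhi (pvMaxW edges) maxw hp) := by
  intro l
  induction l with
  | nil =>
    intro _ maxw hp hlen h0 hv0 hheap hble
    refine ⟨hlen, h0, hv0, fun z => pvBelow_refl _, fun z m' h => Or.inl h,
      fun p hp => hp, hheap, hble, by simp, le_refl _⟩
  | cons p l ih =>
    intro hl maxw hp hlen h0 hv0 hheap hble
    obtain ⟨x, y, hmemE, horient⟩ := hl p (by simp)
    have hEB := hok _ hmemE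
    simp only [pvEdgeOK] at hEB
    have hx0 : 0 ≤ x := by simp at hEB; tauto
    have hxn : x ≤ n := by simp at hEB; tauto
    have hy0 : 0 ≤ y := by simp at hEB; tauto
    have hyn : y ≤ n := by simp at hEB; tauto
    have hp10 : 0 ≤ p.1 := by rcases horient with ⟨_, h⟩ | ⟨_, h⟩ <;> omega
    have hp1n : p.1 ≤ n := by rcases horient with ⟨_, h⟩ | ⟨_, h⟩ <;> omega
    have hwM : p.2 ≤ pvMaxW edges := pvMaxW_ge hmemE
    have hnewM : max d0 p.2 ≤ pvMaxW edges := max_le hd0M hwM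
    have hnew0 : 0 ≤ max d0 p.2 := le_trans hd00 (le_max_left _ _)
    have hM0 : 0 ≤ pvMaxW edges := pvMaxW_nonneg
    have hnewset : max d0 p.2 = 0 ∨ ∃ x' y', [x', y', max d0 p.2] ∈ edges := by
      rcases max_choice d0 p.2 with hc | hc
      · rw [hc]; exact hd0set
      · rw [hc]; exact Or.inr ⟨x, y, hmemE⟩
    have h0' : maxw.getD (0 : Int).toNat none = some 0 := h0
    have hv0' : maxw.getD v0.toNat none = some d0 := hv0
    rw [List.foldl_cons]
    by_cases hguard : pvFinLt (max d0 p.2) (maxw.getD p.1.toNat none) = true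
    · -- update branch
      have hstep : pvRelax d0 (maxw, hp) p =
          (maxw.set p.1.toNat (some (max d0 p.2)), hp ++ [(max d0 p.2, p.1)]) := by
        show (if pvFinLt (max d0 p.2) (maxw.getD p.1.toNat none) = true then
          (maxw.set p.1.toNat (some (max d0 p.2)), hp ++ [(max d0 p.2, p.1)])
          else (maxw, hp)) = _
        rw [if_pos hguard]
      rw [hstep]
      set maxw' := maxw.set p.1.toNat (some (max d0 p.2)) with hmaxw'
      set hp' := hp ++ [(max d0 p.2, p.1)] with hhp'
      have hplen : p.1.toNat < maxw.length := by rw [hlen]; omega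
      have hmwself : pvMw maxw' p.1 = some (max d0 p.2) := pvMw_set_self hp10 hplen _
      have hmwne : ∀ z : Int, 0 ≤ z → z ≠ p.1 → pvMw maxw' z = pvMw maxw z :=
        fun z hz hne => pvMw_set_ne hp10 hz hne _
      have hpne0 : p.1 ≠ 0 := by
        intro he
        rw [he, h0'] at hguard
        rw [pvFinLt_eq_true_iff] at hguard
        have := hguard 0 rfl
        omega
      have hpnev0 : p.1 ≠ v0 := by
        intro he
        rw [he, hv0'] at hguard
        rw [pvFinLt_eq_true_iff] at hguard
        have := hguard d0 rfl
        have := le_max_left d0 p.2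
        omega
      have hb' : ∀ z : Int, pvBelow (pvMw maxw' z) (pvMw maxw z) := by
        intro z m hz
        by_cases hze : z = p.1
        · subst hze
          simp only [pvMw] at hz
          rw [hz, pvFinLt_eq_true_iff] at hguard
          exact ⟨_, hmwself, le_of_lt (hguard m rfl)⟩
        · by_cases hz0 : 0 ≤ z
          · rw [hmwne z hz0 hze]
            exact ⟨m, hz, le_refl m⟩
          · have hzn : z.toNat = 0 := by omega
            have hpn : p.1.toNat ≠ 0 := by omega
            have heq : pvMw maxw' z = pvMw maxw z := by
              simp only [pvMw, hmaxw', hzn, List.getD_eq_getElem?_getD, List.getElem?_set]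
              rw [if_neg hpn]
            rw [heq]
            exact ⟨m, hz, le_refl m⟩
      have ih' := ih (fun q hq => hl q (by simp [hq])) maxw' hp'
        (by rw [hmaxw', List.length_set]; exact hlen)
        (by rw [hmwne 0 le_rfl (Ne.symm hpne0)]; exact h0)
        (by rw [hmwne v0 hv00 (Ne.symm hpnev0)]; exact hv0)
        (by
          intro d v hdv
          rcases List.mem_append.mp hdv with hmem | hmem
          · exact hheap d v hmem
          · simp at hmem
            obtain ⟨rfl, rfl⟩ := hmem
            refine ⟨?_, hp10, hp1n, hnew0, hnewM, hnewset⟩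
            refine pvReach.step (pvReach_mono (le_max_left _ _) hreach) ?_
            rcases horient with ⟨hxv, hyp⟩ | ⟨hyv, hxp⟩
            · exact ⟨x, y, p.2, hmemE, le_max_right _ _, Or.inl ⟨by omega, by omega⟩⟩
            · exact ⟨x, y, p.2, hmemE, le_max_right _ _, Or.inr ⟨by omega, by omega⟩⟩)
        (by
          intro d v hdv
          rcases List.mem_append.mp hdv with hmem | hmem
          · have hole := hble d v hmem
            have hvge : 0 ≤ v := (hheap d v hmem).2.1
            by_cases hv : v = p.1
            · subst hv
              obtain ⟨m, hm, hmd⟩ := hole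
              simp only [pvMw] at hm
              rw [hm, pvFinLt_eq_true_iff] at hguard
              rw [hmwself]
              exact ⟨_, rfl, le_trans (le_of_lt (hguard m rfl)) hmd⟩
            · rw [hmwne v hvge hv]; exact hole
          · simp at hmem
            obtain ⟨rfl, rfl⟩ := hmem
            rw [hmwself]
            exact ⟨_, rfl, le_refl _⟩)
      obtain ⟨f1, f2, f3, f4, f5, f6, f7, f8, f9, f10⟩ := ih'
      refine ⟨f1, f2, f3, ?_, ?_, ?_, f7, f8, ?_, ?_⟩
      · exact fun z => pvBelow_trans (f4 z) (hb' z)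
      · intro z m' hz
        rcases f5 z m' hz with hleft | hright
        · by_cases hze : z = p.1
          · subst hze
            rw [hmwself] at hleft
            have hmeq : m' = max d0 p.2 := by injection hleft with h'; exact h'.symm
            subst hmeq
            exact Or.inr (f6 _ (by simp [hhp']))
          · by_cases hz0 : 0 ≤ z
            · rw [hmwne z hz0 hze] at hleft; exact Or.inl hleft
            · have hzn : z.toNat = 0 := by omega
              have hpn : p.1.toNat ≠ 0 := by omega
              simp only [pvMw, hmaxw', hzn, List.getD_eq_getElem?_getD,
                List.getElem?_set] at hleft
              rw [if_neg hpn] at hleft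
              left
              simp only [pvMw, hzn, List.getD_eq_getElem?_getD]
              exact hleft
        · exact Or.inr hright
      · exact fun q hq => f6 q (by simp [hhp', hq])
      · intro q hq
        rcases List.mem_cons.mp hq with heq | hq'
        · subst heq
          refine pvOle_of_below (f4 q.1) ?_
          rw [hmwself]
          exact ⟨_, rfl, le_refl _⟩
        · exact f9 q hq'
      · refine le_trans f10 ?_
        have hrankdrop : pvRank (pvMaxW edges) (some (max d0 p.2)) <
            pvRank (pvMaxW edges) (maxw.getD p.1.toNat none) := by
          rcases hold : maxw.getD p.1.toNat none with _ | o
          · simp only [pvRank]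
            omega
          · rw [hold, pvFinLt_eq_true_iff] at hguard
            have hlt := hguard o rfl
            simp only [pvRank]
            omega
        have hlt := pvSum_set_lt (pvRank (pvMaxW edges)) hplen hrankdrop
        simp only [pvPhi, hmaxw', hhp', List.length_append, List.length_cons, List.length_nil]
        omega
    · -- no-update branch
      have hstep : pvRelax d0 (maxw, hp) p = (maxw, hp) := by
        show (if pvFinLt (max d0 p.2) (maxw.getD p.1.toNat none) = true then
          (maxw.set p.1.toNat (some (max d0 p.2)), hp ++ [(max d0 p.2, p.1)])
          else (maxw, hp)) = _
        rw [if_neg hguard]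
      rw [hstep]
      have ih' := ih (fun q hq => hl q (by simp [hq])) maxw hp hlen h0 hv0 hheap hble
      obtain ⟨f1, f2, f3, f4, f5, f6, f7, f8, f9, f10⟩ := ih'
      refine ⟨f1, f2, f3, f4, f5, f6, f7, f8, ?_, f10⟩
      intro q hq
      rcases List.mem_cons.mp hq with heq | hq'
      · subst heq
        refine pvOle_of_below (f4 q.1) ?_
        rw [pvFinLt_eq_true_iff] at hguard
        push_neg at hguard
        obtain ⟨o, holdo, hle⟩ := hguard
        exact ⟨o, by simp only [pvMw]; exact holdo, hle⟩
      · exact f9 q hq'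

-- ---------- the main loop ----------

theorem pvFinGt_eq_true_iff (a : Int) (o : Option Int) :
    pvFinGt a o = true ↔ ∃ m, o = some m ∧ m < a := by
  cases o <;> simp [pvFinGt]

theorem pvReach_range {n : Int} {edges : List (List Int)} (hn : 0 ≤ n)
    (hok : ∀ e ∈ edges, pvEdgeOK n e = true) {t z : Int}
    (h : pvReach edges t z) : 0 ≤ z ∧ z ≤ n := by
  induction h with
  | refl => exact ⟨le_refl 0, hn⟩
  | step _ he _ =>
    obtain ⟨x, y, w, hm, _, ho⟩ := he
    have hB := hok _ hm
    simp [pvEdgeOK] at hB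
    rcases ho with ⟨_, h2⟩ | ⟨_, h2⟩ <;> constructor <;> omega

-- the cut argument: any 0 ≤ t with n t-reachable is covered by max_w or by a heap key ≤ t
theorem pvF {n : Int} {edges : List (List Int)} {maxw : List (Option Int)}
    {heap : List (Int × Int)} (hn : 0 ≤ n) (hok : ∀ e ∈ edges, pvEdgeOK n e = true)
    (hinv : pvInv n edges maxw heap) :
    ∀ t z : Int, 0 ≤ t → pvReach edges t z →
    pvOle (pvMw maxw z) t ∨ ∃ d v : Int, (d, v) ∈ heap ∧ d ≤ t := by
  obtain ⟨_, I2, I3, _, _, _⟩ := hinv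
  intro t z ht hr
  induction hr with
  | refl => exact Or.inl ⟨0, I2, ht⟩
  | step hra he ihr =>
    rename_i a b
    rcases ihr with ⟨m, hma, hmt⟩ | hright
    · obtain ⟨ha0, han⟩ := pvReach_range hn hok hra
      rcases I3 a ha0 han m hma with hmem | hrel
      · exact Or.inr ⟨m, a, hmem, hmt⟩
      · obtain ⟨x, y, w, hmE, hwt, ho⟩ := he
        obtain ⟨hrx, hry⟩ := hrel x y w hmE
        rcases ho with ⟨hxa, hyb⟩ | ⟨hxb, hya⟩
        · refine Or.inl (pvOle_mono (max_le hmt hwt) ?_)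
          rw [← hyb]
          exact hrx hxa
        · refine Or.inl (pvOle_mono (max_le hmt hwt) ?_)
          rw [← hxb]
          exact hry hya
    · exact Or.inr hright

theorem pvLoopA_main {n : Int} {edges : List (List Int)} (hn : 0 ≤ n)
    (hok : ∀ e ∈ edges, pvEdgeOK n e = true)
    {adj : List (List (Int × Int))}
    (hadjS : ∀ (i : Nat) (p : Int × Int), p ∈ adj.getD i [] →
      ∃ x y : Int, [x, y, p.2] ∈ edges ∧ ((x.toNat = i ∧ y = p.1) ∨ (y.toNat = i ∧ x = p.1)))
    (hadjC : ∀ x y w : Int, [x, y, w] ∈ edges →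
      (y, w) ∈ adj.getD x.toNat [] ∧ (x, w) ∈ adj.getD y.toNat []) :
    ∀ (fuel : Nat) (maxw : List (Option Int)) (heap : List (Int × Int)),
    pvInv n edges maxw heap →
    pvPhi (pvMaxW edges) maxw heap < fuel →
    (pvLoopA n adj fuel maxw heap = -1 ∧ ∀ t : Int, 0 ≤ t → ¬ pvReach edges t n) ∨
    (pvReach edges (pvLoopA n adj fuel maxw heap) n ∧
     (pvLoopA n adj fuel maxw heap = 0 ∨
        ∃ x y, [x, y, pvLoopA n adj fuel maxw heap] ∈ edges) ∧
     0 ≤ pvLoopA n adj fuel maxw heap ∧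
     (∀ t : Int, 0 ≤ t → pvReach edges t n → pvLoopA n adj fuel maxw heap ≤ t)) := by
  intro fuel
  induction fuel with
  | zero =>
    intro maxw heap _ hfuel
    exact absurd hfuel (Nat.not_lt_zero _)
  | succ fuel ih =>
    intro maxw heap hinv hfuel
    rcases heap with _ | ⟨h, t⟩
    · -- empty heap: return -1, nothing reachable
      left
      refine ⟨rfl, ?_⟩
      intro t ht hr
      rcases pvF hn hok hinv t n ht hr with ⟨mz, hmz, _⟩ | ⟨d, v, hmem, _⟩
      · obtain ⟨_, _, _, I4, _, _⟩ := hinv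
        exact absurd (I4 mz hmz) (List.not_mem_nil)
      · exact absurd hmem (List.not_mem_nil)
    · -- nonempty heap
      have hred : pvLoopA n adj (fuel + 1) maxw (h :: t) =
          (if (pvMinLex h t).2 = n then (pvMinLex h t).1
           else if pvFinGt (pvMinLex h t).1 (maxw.getD (pvMinLex h t).2.toNat none) = true then
             pvLoopA n adj fuel maxw ((h :: t).erase (pvMinLex h t))
           else
             pvLoopA n adj fuel
               ((adj.getD (pvMinLex h t).2.toNat []).foldl (pvRelax (pvMinLex h t).1)
                 (maxw, (h :: t).erase (pvMinLex h t))).1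
               ((adj.getD (pvMinLex h t).2.toNat []).foldl (pvRelax (pvMinLex h t).1)
                 (maxw, (h :: t).erase (pvMinLex h t))).2) := rfl
      set m := pvMinLex h t with hm
      set rest := (h :: t).erase m with hrest
      have hm_mem : m ∈ h :: t := pvMinLex_mem
      have hmin : ∀ x ∈ h :: t, m.1 ≤ x.1 := pvMinLex_min
      have hrest_sub : ∀ p, p ∈ rest → p ∈ h :: t := fun p hp => List.erase_subset hp
      have hmem_ne : ∀ p : Int × Int, p ∈ h :: t → p ≠ m → p ∈ rest := by
        intro p hp hne
        rw [hrest]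
        exact (List.mem_erase_of_ne hne).mpr hp
      obtain ⟨I1, I2, I3, I4, I5, I6⟩ := hinv
      have hmP3 := I5 m.1 m.2 (by simpa using hm_mem)
      obtain ⟨hmReach, hm20, hm2n, hm10, hm1M, hm1set⟩ := hmP3
      by_cases hAn : m.2 = n
      · -- pop n: return m.1
        right
        rw [hred, if_pos hAn]
        refine ⟨hAn ▸ hmReach, hm1set, hm10, ?_⟩
        intro t' ht' hrt
        rcases pvF hn hok ⟨I1, I2, I3, I4, I5, I6⟩ t' n ht' hrt with ⟨mz, hmz, hmzt⟩ | ⟨d, v, hmem, hdt⟩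
        · have := I4 mz hmz
          have := hmin (mz, n) this
          simp at this
          omega
        · have := hmin (d, v) hmem
          simp at this
          omega
      · by_cases hstale : pvFinGt m.1 (maxw.getD m.2.toNat none) = true
        · -- stale entry: drop it
          have hmv : ∃ mv, pvMw maxw m.2 = some mv ∧ mv < m.1 := by
            rw [pvFinGt_eq_true_iff] at hstale
            obtain ⟨mv, hmv, hlt⟩ := hstale
            exact ⟨mv, by simp only [pvMw]; exact hmv, hlt⟩
          obtain ⟨mv, hmv, hmvlt⟩ := hmv
          have hinv' : pvInv n edges maxw rest := by
            refine ⟨I1, I2, ?_, ?_, ?_, ?_⟩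
            · intro v hv0 hvn m' hm'
              rcases I3 v hv0 hvn m' hm' with hmem | hrel
              · left
                refine hmem_ne _ hmem ?_
                intro he
                obtain ⟨he1, he2⟩ := Prod.ext_iff.mp he
                have he1' : m' = m.1 := he1
                have he2' : v = m.2 := he2
                rw [he2', hmv] at hm'
                injection hm' with h'
                omega
              · exact Or.inr hrel
            · intro mz hmz
              refine hmem_ne _ (I4 mz hmz) ?_
              intro he
              exact hAn ((Prod.ext_iff.mp he).2.symm)
            · exact fun d v hdv => I5 d v (hrest_sub _ hdv)
            · exact fun d v hdv => I6 d v (hrest_sub _ hdv)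
          have hphi : pvPhi (pvMaxW edges) maxw rest < fuel := by
            have hlenr : rest.length = (h :: t).length - 1 := by
              rw [hrest]
              exact List.length_erase_of_mem hm_mem
            simp only [pvPhi] at hfuel ⊢
            simp [hlenr] at hfuel ⊢
            omega
          rcases ih maxw rest hinv' hphi with ⟨hval, hneg⟩ | ⟨h1, h2, h3, h4⟩
          · left
            rw [hred, if_neg hAn, if_pos hstale]
            exact ⟨hval, hneg⟩
          · right
            rw [hred, if_neg hAn, if_pos hstale]
            exact ⟨h1, h2, h3, h4⟩
        · -- process m
          have hmv : pvMw maxw m.2 = some m.1 := by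
            obtain ⟨mv, hmv, hmvle⟩ := I6 m.1 m.2 (by simpa using hm_mem)
            have : ¬ mv < m.1 := by
              intro hlt
              exact hstale ((pvFinGt_eq_true_iff _ _).mpr ⟨mv, by simpa [pvMw] using hmv, hlt⟩)
            have : mv = m.1 := by omega
            rw [← this]
            exact hmv
          have hl : ∀ p ∈ adj.getD m.2.toNat [], ∃ x y, [x, y, p.2] ∈ edges ∧
              ((x = m.2 ∧ y = p.1) ∨ (y = m.2 ∧ x = p.1)) := by
            intro p hp
            obtain ⟨x, y, hmE, ho⟩ := hadjS m.2.toNat p hp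
            have hB := hok _ hmE
            simp [pvEdgeOK] at hB
            refine ⟨x, y, hmE, ?_⟩
            rcases ho with ⟨hx, hy⟩ | ⟨hy, hx⟩
            · exact Or.inl ⟨by omega, hy⟩
            · exact Or.inr ⟨by omega, hx⟩
          have hrestheap : ∀ d v : Int, (d, v) ∈ rest → pvReach edges d v ∧ 0 ≤ v ∧ v ≤ n ∧
              0 ≤ d ∧ d ≤ pvMaxW edges ∧ (d = 0 ∨ ∃ x y, [x, y, d] ∈ edges) :=
            fun d v hdv => I5 d v (hrest_sub _ hdv)
          have hrestble : ∀ d v : Int, (d, v) ∈ rest → pvOle (pvMw maxw v) d :=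
            fun d v hdv => I6 d v (hrest_sub _ hdv)
          obtain ⟨f1, f2, f3, f4, f5, f6, f7, f8, f9, f10⟩ :=
            pvRelaxFold hn hok hm20 hm2n hm10 hm1M hm1set hmReach
              (adj.getD m.2.toNat []) hl maxw rest I1 I2 hmv hrestheap hrestble
          have hinv' : pvInv n edges
              ((adj.getD m.2.toNat []).foldl (pvRelax m.1) (maxw, rest)).1
              ((adj.getD m.2.toNat []).foldl (pvRelax m.1) (maxw, rest)).2 := by
            refine ⟨f1, f2, ?_, ?_, f7, f8⟩
            · intro v hv0 hvn m' hm'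
              by_cases hvv : v = m.2
              · subst hvv
                rw [f3] at hm'
                have hm'eq : m' = m.1 := by injection hm' with h'; omega
                subst hm'eq
                right
                intro x y w hmE
                constructor
                · intro hxv
                  have := (hadjC x y w hmE).1
                  rw [hxv] at this
                  exact f9 (y, w) this
                · intro hyv
                  have := (hadjC x y w hmE).2
                  rw [hyv] at this
                  exact f9 (x, w) this
              · rcases f5 v m' hm' with hleft | hright
                · rcases I3 v hv0 hvn m' hleft with hmem | hrel
                  · left
                    refine f6 _ (hmem_ne _ hmem ?_)
                    intro he
                    exact hvv ((Prod.ext_iff.mp he).2)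
                  · exact Or.inr (pvRelaxedAt_below f4 hrel)
                · exact Or.inl hright
            · intro mz hmz
              rcases f5 n mz hmz with hleft | hright
              · refine f6 _ (hmem_ne _ (I4 mz hleft) ?_)
                intro he
                exact hAn ((Prod.ext_iff.mp he).2.symm)
              · exact hright
          have hphi : pvPhi (pvMaxW edges)
              ((adj.getD m.2.toNat []).foldl (pvRelax m.1) (maxw, rest)).1
              ((adj.getD m.2.toNat []).foldl (pvRelax m.1) (maxw, rest)).2 < fuel := by
            refine lt_of_le_of_lt f10 ?_
            have hlenr : rest.length = (h :: t).length - 1 := by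
              rw [hrest]
              exact List.length_erase_of_mem hm_mem
            simp only [pvPhi] at hfuel ⊢
            simp [hlenr] at hfuel ⊢
            omega
          rcases ih _ _ hinv' hphi with ⟨hval, hneg⟩ | ⟨h1, h2, h3, h4⟩
          · left
            rw [hred, if_neg hAn, if_neg hstale]
            exact ⟨hval, hneg⟩
          · right
            rw [hred, if_neg hAn, if_neg hstale]
            exact ⟨h1, h2, h3, h4⟩

-- ---------- assembling the equivalence ----------

theorem pvRepl_getD (N i : Nat) :
    (List.replicate N ([] : List (Int × Int))).getD i [] = [] := by
  simp [List.getD_eq_getElem?_getD, List.getElem?_replicate]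
  split_ifs <;> rfl

theorem pvReplO_getD (N i : Nat) :
    (List.replicate N (none : Option Int)).getD i none = none := by
  simp [List.getD_eq_getElem?_getD, List.getElem?_replicate]
  split_ifs <;> rfl

theorem minMaxDanger_eq_alt (n : Int) (edges : List (List Int))
    (hn : 0 ≤ n) (hok : ∀ e ∈ edges, pvEdgeOK n e = true) :
    minMaxDanger n edges = minMaxDanger_alt n edges := by
  have hA : minMaxDanger n edges =
      pvLoopA n (edges.foldl pvEdgeAdd (List.replicate (n + 1).toNat []))
        ((n + 1).toNat * (pvMaxW edges + 1).toNat + 2)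
        ((List.replicate (n + 1).toNat (none : Option Int)).set 0 (some 0))
        [((0 : Int), (0 : Int))] := rfl
  have hB : minMaxDanger_alt n edges = pvScan n edges (pvCands edges) := rfl
  have hN1 : 1 ≤ (n + 1).toNat := by omega
  -- adjacency facts
  have hadjS : ∀ (i : Nat) (p : Int × Int),
      p ∈ (edges.foldl pvEdgeAdd (List.replicate (n + 1).toNat [])).getD i [] →
      ∃ x y : Int, [x, y, p.2] ∈ edges ∧ ((x.toNat = i ∧ y = p.1) ∨ (y.toNat = i ∧ x = p.1)) := by
    intro i p hp
    rcases pvAdj_sound edges _ i p hp with hmem | ⟨x, y, w, hm, hw, ho⟩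
    · rw [pvRepl_getD] at hmem; simp at hmem
    · subst hw
      exact ⟨x, y, hm, ho⟩
  have hadjC : ∀ x y w : Int, [x, y, w] ∈ edges →
      (y, w) ∈ (edges.foldl pvEdgeAdd (List.replicate (n + 1).toNat [])).getD x.toNat [] ∧
      (x, w) ∈ (edges.foldl pvEdgeAdd (List.replicate (n + 1).toNat [])).getD y.toNat [] := by
    intro x y w hm
    have hB := hok _ hm
    simp [pvEdgeOK] at hB
    refine pvAdj_complete edges _ x y w hm ?_ ?_ <;> (rw [List.length_replicate]; omega)
  -- the initial state satisfies the invariant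
  have hlen0 : ((List.replicate (n + 1).toNat (none : Option Int)).set 0 (some 0)).length =
      (n + 1).toNat := by simp
  have hmw00 : pvMw ((List.replicate (n + 1).toNat (none : Option Int)).set 0 (some 0)) 0 =
      some 0 := by
    refine pvMw_set_self le_rfl ?_ _
    rw [List.length_replicate]
    omega
  have hmw0ne : ∀ v : Int, 0 ≤ v → v ≠ 0 →
      pvMw ((List.replicate (n + 1).toNat (none : Option Int)).set 0 (some 0)) v = none := by
    intro v hv0 hvne
    have h1 : pvMw ((List.replicate (n + 1).toNat (none : Option Int)).set (0 : Int).toNat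
        (some 0)) v = pvMw (List.replicate (n + 1).toNat (none : Option Int)) v :=
      pvMw_set_ne le_rfl hv0 hvne _
    simp only [Int.toNat_zero] at h1
    rw [h1]
    simp only [pvMw]
    exact pvReplO_getD _ _
  have hinv0 : pvInv n edges ((List.replicate (n + 1).toNat (none : Option Int)).set 0 (some 0))
      [((0 : Int), (0 : Int))] := by
    refine ⟨hlen0, hmw00, ?_, ?_, ?_, ?_⟩
    · intro v hv0 hvn m' hm'
      by_cases hv : v = 0
      · subst hv
        rw [hmw00] at hm'
        injection hm' with h'
        left
        simp [← h']
      · rw [hmw0ne v hv0 hv] at hm'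
        cases hm'
    · intro mz hmz
      by_cases hn0 : n = 0
      · subst hn0
        rw [hmw00] at hmz
        injection hmz with h'
        simp [← h']
      · rw [hmw0ne n hn (by omega)] at hmz
        cases hmz
    · intro d v hdv
      simp at hdv
      obtain ⟨rfl, rfl⟩ := hdv
      exact ⟨pvReach.refl, le_refl 0, hn, le_refl 0, pvMaxW_nonneg, Or.inl rfl⟩
    · intro d v hdv
      simp at hdv
      obtain ⟨rfl, rfl⟩ := hdv
      exact ⟨0, hmw00, le_refl 0⟩
  -- fuel suffices
  have hfuel : pvPhi (pvMaxW edges)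
      ((List.replicate (n + 1).toNat (none : Option Int)).set 0 (some 0))
      [((0 : Int), (0 : Int))] < (n + 1).toNat * (pvMaxW edges + 1).toNat + 2 := by
    have hsum := pvSum_set (pvRank (pvMaxW edges)) (List.replicate (n + 1).toNat none) 0
      (by rw [List.length_replicate]; omega) (some 0)
    have hget : (List.replicate (n + 1).toNat (none : Option Int)).getD 0 none = none :=
      pvReplO_getD _ _
    rw [hget] at hsum
    have hr1 : pvRank (pvMaxW edges) (some 0) = 0 := by simp [pvRank]
    have hr2 : pvRank (pvMaxW edges) none = (pvMaxW edges + 1).toNat := rfl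
    rw [hr1, hr2] at hsum
    have hrepsum : ((List.replicate (n + 1).toNat (none : Option Int)).map
        (pvRank (pvMaxW edges))).sum = (n + 1).toNat * (pvMaxW edges + 1).toNat := by
      rw [List.map_replicate, List.sum_replicate, hr2]
      simp [Nat.smul_one_eq_cast]
    rw [hrepsum] at hsum
    simp only [pvPhi, List.length_cons, List.length_nil]
    omega
  rcases pvLoopA_main hn hok hadjS hadjC _ _ _ hinv0 hfuel with ⟨hval, hneg⟩ | ⟨h1, h2, h3, h4⟩
  · rw [hA, hval, hB]
    symm
    apply pvScan_neg
    intro t ht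
    have ht0 : 0 ≤ t := by
      rcases pvCands_mem.mp ht with rfl | ⟨_, hpos⟩
      · exact le_refl 0
      · exact le_of_lt hpos
    cases hb : pvReachable n edges t
    · rfl
    · exact absurd ((pvReachable_iff hn hok).mp hb) (hneg t ht0)
  · rw [hA, hB]
    symm
    apply pvScan_hit
    · exact pvCands_sorted
    · rw [pvCands_mem]
      rcases h2 with h2 | ⟨x, y, h2⟩
      · exact Or.inl h2
      · rcases lt_or_eq_of_le h3 with hpos | hzero
        · exact Or.inr ⟨⟨x, y, h2⟩, hpos⟩
        · exact Or.inl hzero.symm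
    · exact (pvReachable_iff hn hok).mpr h1
    · intro t ht hlt
      have ht0 : 0 ≤ t := by
        rcases pvCands_mem.mp ht with rfl | ⟨_, hpos⟩
        · exact le_refl 0
        · exact le_of_lt hpos
      cases hb : pvReachable n edges t
      · rfl
      · have := h4 t ht0 ((pvReachable_iff hn hok).mp hb)
        omega

-- ===== VERDICT (by name: the statement is the Claim_ definition above) =====
theorem minMaxDanger_spec : Claim_equal_minMaxDanger := by
  intro n edges _ hpre
  obtain ⟨hn, hall⟩ := hpre
  have hok : ∀ e ∈ edges, pvEdgeOK n e = true := by
    rw [List.all_eq_true] at hall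
    exact hall
  show minMaxDanger n edges = minMaxDanger_alt n edges
  exact minMaxDanger_eq_alt n edges hn hok
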